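-- pv_equiv track=rewrite | github.com/Buscedv/Ask | ask-old.py | separate_indents_and_content
-- ===== SOURCE A (Python) =====
-- def separate_indents_and_content(string):
-- 	tmp_indents = ''
-- 	tmp_string = ''
--
-- 	for tmp_char in string:
-- 		if tmp_char == '\t':
-- 			tmp_indents += '\t'
-- 		else:
-- 			tmp_string += tmp_char
--
-- 	return tmp_indents, tmp_string
-- ===== SOURCE B (Python) =====
-- def separate_indents_and_content(string):
-- 	content = string.replace('\t', '')
-- 	return '\t' * string.count('\t'), content
-- ===== Notes on version B (the rewrite author's own statement) =====
-- stated objective: idiomatic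
-- what changed: Replaces the explicit char-by-char loop with two per-character string accumulators by two whole-string C-level library passes: content strips the tabs with str.replace and the indent prefix is rebuilt as tab times str.count.
import Mathlib
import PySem

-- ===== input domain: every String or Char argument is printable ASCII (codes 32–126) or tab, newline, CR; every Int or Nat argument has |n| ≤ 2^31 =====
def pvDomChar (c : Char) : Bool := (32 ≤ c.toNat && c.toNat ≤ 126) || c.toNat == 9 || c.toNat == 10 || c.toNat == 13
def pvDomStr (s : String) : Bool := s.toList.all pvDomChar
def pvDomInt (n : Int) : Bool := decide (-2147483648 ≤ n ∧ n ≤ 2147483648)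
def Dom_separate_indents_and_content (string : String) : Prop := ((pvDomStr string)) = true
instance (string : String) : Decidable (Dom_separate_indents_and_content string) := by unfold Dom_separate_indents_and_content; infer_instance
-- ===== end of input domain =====

-- B replaces A's char-by-char loop with two whole-string library passes (replace + count); objective: idiomatic.

-- ===== PORT A =====
-- the loop: two string accumulators, one character at a time (strings carried as List Char)
def separate_indents_and_content (string : String) : String × String :=
  let r := string.toList.foldl
    (fun (acc : List Char × List Char) tmp_char =>
      if tmp_char = '\t' then (acc.1 ++ ['\t'], acc.2) else (acc.1, acc.2 ++ [tmp_char]))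
    ([], [])
  (String.ofList r.1, String.ofList r.2)

-- ===== PORT B =====
def separate_indents_and_content_alt (string : String) : String × String :=
  let content := PySem.Str.replace string "\t" ""
  (String.ofList (PySem.List.pyRepeat ['\t'] (PySem.Str.count string "\t" : Int)), content)

-- ===== PRECONDITION & SPEC =====
def Spec_separate_indents_and_content (string : String) (out : String × String) : Prop := out = separate_indents_and_content_alt string
instance (string : String) (out : String × String) : Decidable (Spec_separate_indents_and_content string out) := by unfold Spec_separate_indents_and_content; infer_instance

-- ===== CLAIM (what is proved, stated in full; the proofs are below) =====
def Claim_equal_separate_indents_and_content : Prop := ∀ (string : String), Dom_separate_indents_and_content string → Spec_separate_indents_and_content string (separate_indents_and_content string)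

-- ===== LEMMAS AND PROOFS =====

-- A's loop, characterised: first accumulator collects the tabs, second the non-tabs.
theorem pvLoopA (l : List Char) (a b : List Char) :
    l.foldl (fun (acc : List Char × List Char) c =>
      if c = '\t' then (acc.1 ++ ['\t'], acc.2) else (acc.1, acc.2 ++ [c])) (a, b)
    = (a ++ List.replicate (l.count '\t') '\t', b ++ l.filter (fun c => ¬ c = '\t')) := by
  induction l generalizing a b with
  | nil => simp
  | cons c t ih =>
    by_cases h : c = '\t'
    · subst h; simp [ih, List.replicate_succ]
    · simp [h, ih]

-- replace by "" on a single-char pattern is filter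
theorem pvReplaceGo (fuel : Nat) (l acc : List Char) (h : l.length ≤ fuel) :
    PySem.Chars.replace.go ['\t'] [] fuel l acc
    = acc.reverse ++ l.filter (fun c => ¬ c = '\t') := by
  induction fuel generalizing l acc with
  | zero =>
    interval_cases hl : l.length
    simp [List.length_eq_zero_iff.mp hl, PySem.Chars.replace.go]
  | succ n ih =>
    cases l with
    | nil => simp [PySem.Chars.replace.go]
    | cons c t =>
      have ht : t.length ≤ n := Nat.le_of_succ_le_succ (by simpa using h)
      by_cases hc : c = '\t'
      · subst hc
        simp [PySem.Chars.replace.go, List.isPrefixOf, ih _ _ ht]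
      · simp [PySem.Chars.replace.go, List.isPrefixOf, hc, Ne.symm hc, ih _ _ ht]

-- count of a single-char pattern is List.count
theorem pvCountGo (fuel : Nat) (l : List Char) (acc : Nat) (h : l.length ≤ fuel) :
    PySem.Chars.count.go ['\t'] fuel l acc = acc + l.count '\t' := by
  induction fuel generalizing l acc with
  | zero =>
    interval_cases hl : l.length
    simp [List.length_eq_zero_iff.mp hl, PySem.Chars.count.go]
  | succ n ih =>
    cases l with
    | nil => simp [PySem.Chars.count.go]
    | cons c t =>
      have ht : t.length ≤ n := Nat.le_of_succ_le_succ (by simpa using h)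
      by_cases hc : c = '\t'
      · subst hc
        simp [PySem.Chars.count.go, List.isPrefixOf, ih _ _ ht]
        omega
      · simp [PySem.Chars.count.go, List.isPrefixOf, hc, Ne.symm hc, ih _ _ ht]

-- ===== VERDICT (by name: the statement is the Claim_ definition above) =====
theorem separate_indents_and_content_spec : Claim_equal_separate_indents_and_content := by
  intro s _
  unfold Spec_separate_indents_and_content separate_indents_and_content separate_indents_and_content_alt
  have htab : ("\t" : String).toList = ['\t'] := rfl
  have hnil : ("" : String).toList = ([] : List Char) := rfl
  have hrep : (PySem.Str.replace s "\t" "").toList = s.toList.filter (fun c => ¬ c = '\t') := by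
    rw [PySem.Str.toList_replace, htab, hnil]
    simp only [PySem.Chars.replace]
    rw [if_neg (by simp), pvReplaceGo _ _ _ le_rfl]
    simp
  have hcnt : PySem.Str.count s "\t" = s.toList.count '\t' := by
    rw [PySem.Str.count_eq, htab]
    simp only [PySem.Chars.count]
    rw [if_neg (by simp), pvCountGo _ _ _ le_rfl]
    simp
  rw [pvLoopA]
  refine Prod.ext ?_ ?_
  · show String.ofList _ = String.ofList _
    rw [PySem.List.pyRepeat_singleton, hcnt]
    simp
  · show String.ofList _ = PySem.Str.replace s "\t" ""
    have h2 := congrArg String.ofList hrep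
    simp only [String.ofList_toList] at h2
    simpa using h2.symm
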